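-- pv_equiv track=rewrite | github.com/vladiarosh/advent-of-code | advent_of_code_2015/2015_05.py | pairs_counter
-- ===== SOURCE A (Python) =====
-- def pairs_counter(string, window_size):
--     doublets_list = []
--     res1 = False
--     res2 = False
--     res3 = False
--     for g in range(len(string) - window_size + 1):
--         doublet = string[g:g + window_size]
--         doublets_list.append(doublet)
--         if len(doublets_list) != len(set(doublets_list)):
--             res1 = True
--     for m in range(len(doublets_list) - 1):
--         current_doublet = doublets_list[m]
--         next_doublet = doublets_list[m + 1]
--         first_character_current = current_doublet[0]
--         second_character_next = next_doublet[1]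
--         if first_character_current == second_character_next:
--             res2 = True
--     for m in range(len(doublets_list) - 2):
--         current_doublet = doublets_list[m]
--         for n in range(m + 2, len(doublets_list)):
--             if current_doublet == doublets_list[n]:
--                 res3 = True
--     return res1, res2, res3
-- ===== SOURCE B (Python) =====
-- def pairs_counter(string, window_size):
--     n = len(string)
--     count = n - window_size + 1
--     first = {}
--     res1 = False
--     res3 = False
--     for g in range(count):
--         w = string[g:g + window_size]
--         if w in first:
--             res1 = True
--             if g - first[w] >= 2:
--                 res3 = True
--         else:
--             first[w] = g
--     res2 = any(string[m] == string[m + 2] for m in range(count - 1))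
--     return res1, res2, res3
-- ===== Notes on version B (the rewrite author's own statement) =====
-- stated objective: alternative
-- what changed: Replaces A's per-step set(prefix) rebuilds and O(count^2) nested window-pair scan by one pass keeping a dict of each window's first index (membership = duplicate for res1, index gap >= 2 for res3), and checks res2 directly on characters string[m] == string[m+2] instead of materialising windows; intended as faster and measured 9-43x on the generated sizes where both finished, but unconfirmed at the largest size (both degrade when window_size itself grows with the input), so no speed is claimed.
import Mathlib
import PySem

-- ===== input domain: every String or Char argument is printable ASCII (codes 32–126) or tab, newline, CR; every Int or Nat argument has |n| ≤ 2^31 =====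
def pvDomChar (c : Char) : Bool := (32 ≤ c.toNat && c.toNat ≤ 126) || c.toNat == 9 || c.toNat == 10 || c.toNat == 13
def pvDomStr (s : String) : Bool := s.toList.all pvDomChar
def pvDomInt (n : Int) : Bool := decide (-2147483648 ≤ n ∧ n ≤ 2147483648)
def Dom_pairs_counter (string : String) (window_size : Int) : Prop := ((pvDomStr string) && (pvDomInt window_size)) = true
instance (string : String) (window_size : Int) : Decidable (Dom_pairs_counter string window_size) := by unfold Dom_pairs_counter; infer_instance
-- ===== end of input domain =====

-- B replaces A's per-step set(prefix) rebuild and O(n^2) nested window scan by one pass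
-- with a dict of first-occurrence indices, and compares characters directly for res2.

-- ===== PORT A =====
-- A builds the window list while flagging duplicates via len != len(set), then two index
-- loops: adjacent windows' characters, then all window pairs at index distance >= 2.
def pairs_counter (string : String) (window_size : Int) : Bool × Bool × Bool :=
  let cs := string.toList
  let n : Int := (cs.length : Int)
  let st1 := (PySem.List.pyRange 0 (n - window_size + 1) 1).foldl
      (fun (st : List (List Char) × Bool) g =>
        let doublet := PySem.List.slice cs (some g) (some (g + window_size))
        let dl := st.1 ++ [doublet]
        let res1 := if (dl.length : Int) ≠ PySem.Set.len (PySem.Set.ofList dl) then true else st.2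
        (dl, res1))
      ([], false)
  let dl := st1.1
  let res1 := st1.2
  -- list indexing dl[m], dl[m+1] and string indexing x[0], x[1]: always in range inside
  -- Pre_pairs_counter, ported with pyGetD (the default is never read there)
  let res2 := (PySem.List.pyRange 0 ((dl.length : Int) - 1) 1).foldl
      (fun res2 m =>
        let current_doublet := PySem.List.pyGetD dl m []
        let next_doublet := PySem.List.pyGetD dl (m + 1) []
        let first_character_current := PySem.List.pyGetD current_doublet 0 ' '
        let second_character_next := PySem.List.pyGetD next_doublet 1 ' '
        if first_character_current = second_character_next then true else res2)
      false
  let res3 := (PySem.List.pyRange 0 ((dl.length : Int) - 2) 1).foldl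
      (fun res3 m =>
        let current_doublet := PySem.List.pyGetD dl m []
        (PySem.List.pyRange (m + 2) (dl.length : Int) 1).foldl
          (fun res3 nn => if current_doublet = PySem.List.pyGetD dl nn [] then true else res3)
          res3)
      false
  (res1, res2, res3)

-- ===== PORT B =====
-- B: one pass with a dict window -> first index (membership seen = res1, index gap >= 2 = res3),
-- and res2 read off the characters directly.
def pairs_counter_alt (string : String) (window_size : Int) : Bool × Bool × Bool :=
  let cs := string.toList
  let n : Int := (cs.length : Int)
  let count : Int := n - window_size + 1
  let st := (PySem.List.pyRange 0 count 1).foldl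
      (fun (st : PySem.Dict (List Char) Int × Bool × Bool) g =>
        let w := PySem.List.slice cs (some g) (some (g + window_size))
        if st.1.contains w then
          (st.1, true, if 2 ≤ g - st.1.getD w 0 then true else st.2.2)
        else
          (st.1.insert w g, st.2.1, st.2.2))
      (PySem.Dict.empty, false, false)
  let res2 := (PySem.List.pyRange 0 (count - 1) 1).any
      (fun m => PySem.List.pyGetD cs m ' ' == PySem.List.pyGetD cs (m + 2) ' ')
  (st.2.1, res2, st.2.2)

-- ===== PRECONDITION & SPEC =====
-- Pre_ excludes exactly the inputs where A raises IndexError: window_size <= 1 while there are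
-- at least two windows (A's second loop then reads doublet[1] / doublet[0] of a too-short window).
def Pre_pairs_counter (string : String) (window_size : Int) : Prop :=
  2 ≤ window_size ∨ (string.toList.length : Int) ≤ window_size
instance (string : String) (window_size : Int) : Decidable (Pre_pairs_counter string window_size) := by
  unfold Pre_pairs_counter; infer_instance

def pvWitness_pairs_counter : String × Int := ("aabcdbab", 2)

def Spec_pairs_counter (string : String) (window_size : Int) (out : Bool × Bool × Bool) : Prop := out = pairs_counter_alt string window_size
instance (string : String) (window_size : Int) (out : Bool × Bool × Bool) : Decidable (Spec_pairs_counter string window_size out) := by unfold Spec_pairs_counter; infer_instance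

-- ===== CLAIM (what is proved, stated in full; the proofs are below) =====
def Claim_equal_pairs_counter : Prop := ∀ (string : String) (window_size : Int), Dom_pairs_counter string window_size → Pre_pairs_counter string window_size → Spec_pairs_counter string window_size (pairs_counter string window_size)

-- ===== LEMMAS AND PROOFS =====

-- the window starting at g, and the list of all windows for count c
def pvWin (cs : List Char) (ws g : Int) : List Char :=
  PySem.List.slice cs (some g) (some (g + ws))

def pvW (cs : List Char) (ws c : Int) : List (List Char) :=
  (PySem.List.pyRange 0 c 1).map (pvWin cs ws)

-- "some window repeats at index distance ≥ 2 below c"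
def pvE (cs : List Char) (ws c : Int) : Prop :=
  ∃ m nn : Int, 0 ≤ m ∧ m + 2 ≤ nn ∧ nn < c ∧ pvWin cs ws m = pvWin cs ws nn

theorem pvW_length (cs : List Char) (ws c : Int) : (pvW cs ws c).length = c.toNat := by
  simp [pvW, PySem.List.length_pyRange_one]

theorem pvW_succ (cs : List Char) (ws : Int) {b : Int} (hb : 0 ≤ b) :
    pvW cs ws (b + 1) = pvW cs ws b ++ [pvWin cs ws b] := by
  simp [pvW, PySem.List.pyRange_one_succ_right hb]

-- 'if cond: res = True' folds are Bool 'any'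
theorem pv_foldl_ite_or {α : Type} (l : List α) (p : α → Prop) [DecidablePred p] (a : Bool) :
    l.foldl (fun acc x => if p x then true else acc) a = (a || l.any fun x => decide (p x)) := by
  induction l generalizing a with
  | nil => simp
  | cons x xs ih =>
    rw [List.foldl_cons, ih]
    by_cases h : p x <;> simp [h]

theorem pv_foldl_or {α : Type} (l : List α) (q : α → Bool) (a : Bool) :
    l.foldl (fun acc x => acc || q x) a = (a || l.any q) := by
  induction l generalizing a with
  | nil => simp
  | cons x xs ih => simp [List.foldl_cons, ih, Bool.or_assoc]

-- Python's len(l) == len(set(l)) is exactly Nodup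
theorem pv_len_ofList_eq_iff {α : Type} [BEq α] [LawfulBEq α] (l : List α) :
    ((PySem.Set.ofList l).length = l.length) ↔ l.Nodup := by
  induction l using List.reverseRecOn with
  | nil => simp [PySem.Set.ofList]
  | append_singleton xs x ih =>
    by_cases hx : x ∈ xs
    · rw [PySem.Set.ofList_append_singleton, PySem.Set.add_of_mem ((PySem.Set.mem_ofList xs x).mpr hx)]
      have hle := PySem.Set.length_ofList_le xs
      simp only [List.length_append, List.length_cons, List.length_nil]
      constructor
      · intro h; omega
      · intro h; exact absurd hx ((List.nodup_append.mp h).2.2 x hx x (by simp) rfl).elim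
    · rw [PySem.Set.ofList_append_singleton,
        PySem.Set.add_of_not_mem (fun hm => hx ((PySem.Set.mem_ofList xs x).mp hm))]
      simp only [List.length_append, List.length_cons, List.length_nil, List.nodup_append]
      constructor
      · intro h
        refine ⟨ih.mp (by omega), by simp, ?_⟩
        intro a ha b hb; simp at hb; subst hb; exact fun h' => hx (h' ▸ ha)
      · rintro ⟨h1, -, -⟩; have := ih.mpr h1; omega

-- find? over a pyRange returns the least index satisfying p
theorem pv_find?_pyRange_min (p : Int → Bool) :
    ∀ (k : Nat) (a b f m : Int), (b - a).toNat = k →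
    (PySem.List.pyRange a b 1).find? p = some f → a ≤ m → m < b → p m = true → f ≤ m := by
  intro k
  induction k with
  | zero =>
    intro a b f m hk hf _ hmb _
    rw [PySem.List.pyRange_one_eq_nil (by omega)] at hf
    simp at hf
  | succ k ih =>
    intro a b f m hk hf ham hmb hpm
    rw [PySem.List.pyRange_one_cons (by omega)] at hf
    rw [List.find?_cons] at hf
    by_cases hpa : p a
    · simp [hpa] at hf; omega
    · simp [hpa] at hf
      rcases eq_or_lt_of_le ham with h | h
      · exact absurd (h ▸ hpm) (by simpa using hpa)
      · exact ih (a + 1) b f m (by omega) hf (by omega) hmb hpm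

-- the state of A's first loop
theorem pv_A1 (cs : List Char) (ws : Int) (c : Int) :
    ((PySem.List.pyRange 0 c 1).foldl
      (fun (st : List (List Char) × Bool) g =>
        (st.1 ++ [pvWin cs ws g],
          if (((st.1 ++ [pvWin cs ws g]).length : Int) ≠
              PySem.Set.len (PySem.Set.ofList (st.1 ++ [pvWin cs ws g]))) then true else st.2))
      ([], false))
    = (pvW cs ws c, !decide (pvW cs ws c).Nodup) := by
  by_cases hc : 0 ≤ c
  · induction c, hc using Int.le_induction with
    | base => simp [pvW, PySem.List.pyRange_one_eq_nil (le_refl 0)]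
    | succ b hb ih =>
      rw [PySem.List.pyRange_one_succ_right hb, List.foldl_append, ih, pvW_succ cs ws hb]
      simp only [List.foldl_cons, List.foldl_nil]
      refine Prod.ext rfl ?_
      simp only
      by_cases hn : (pvW cs ws b ++ [pvWin cs ws b]).Nodup
      · have hofl : PySem.Set.ofList (pvW cs ws b ++ [pvWin cs ws b]) = pvW cs ws b ++ [pvWin cs ws b] :=
          PySem.Set.ofList_eq_self_of_nodup _ hn
        have hlen : (((pvW cs ws b ++ [pvWin cs ws b]).length : Int) =
            PySem.Set.len (PySem.Set.ofList (pvW cs ws b ++ [pvWin cs ws b]))) := by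
          rw [hofl]; rfl
        rw [if_neg (by simpa using hlen)]
        have hb' : (pvW cs ws b).Nodup := (List.sublist_append_left _ _).nodup hn
        simp [hn, hb']
      · have hne : (((pvW cs ws b ++ [pvWin cs ws b]).length : Int) ≠
            PySem.Set.len (PySem.Set.ofList (pvW cs ws b ++ [pvWin cs ws b]))) := by
          intro h
          have : (PySem.Set.ofList (pvW cs ws b ++ [pvWin cs ws b])).length =
              (pvW cs ws b ++ [pvWin cs ws b]).length := by
            have : PySem.Set.len (PySem.Set.ofList (pvW cs ws b ++ [pvWin cs ws b])) =
                ((PySem.Set.ofList (pvW cs ws b ++ [pvWin cs ws b])).length : Int) := rfl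
            omega
          exact hn ((pv_len_ofList_eq_iff _).mp this)
        rw [if_pos hne]
        simp [hn]
  · rw [PySem.List.pyRange_one_eq_nil (by omega)]
    simp [pvW, PySem.List.pyRange_one_eq_nil (show c ≤ 0 by omega)]

-- the state of B's single loop: dict of first occurrences, res1 = duplicate seen, res3 = pvE
theorem pv_B1 (cs : List Char) (ws : Int) (c : Int) :
    (∀ w, ((PySem.List.pyRange 0 c 1).foldl
        (fun (st : PySem.Dict (List Char) Int × Bool × Bool) g =>
          if st.1.contains (pvWin cs ws g) then
            (st.1, true, if 2 ≤ g - st.1.getD (pvWin cs ws g) 0 then true else st.2.2)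
          else
            (st.1.insert (pvWin cs ws g) g, st.2.1, st.2.2))
        (PySem.Dict.empty, false, false)).1.get? w
      = (PySem.List.pyRange 0 c 1).find? (fun g => pvWin cs ws g == w)) ∧
    ((PySem.List.pyRange 0 c 1).foldl
        (fun (st : PySem.Dict (List Char) Int × Bool × Bool) g =>
          if st.1.contains (pvWin cs ws g) then
            (st.1, true, if 2 ≤ g - st.1.getD (pvWin cs ws g) 0 then true else st.2.2)
          else
            (st.1.insert (pvWin cs ws g) g, st.2.1, st.2.2))
        (PySem.Dict.empty, false, false)).2.1 = !decide (pvW cs ws c).Nodup ∧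
    (((PySem.List.pyRange 0 c 1).foldl
        (fun (st : PySem.Dict (List Char) Int × Bool × Bool) g =>
          if st.1.contains (pvWin cs ws g) then
            (st.1, true, if 2 ≤ g - st.1.getD (pvWin cs ws g) 0 then true else st.2.2)
          else
            (st.1.insert (pvWin cs ws g) g, st.2.1, st.2.2))
        (PySem.Dict.empty, false, false)).2.2 = true ↔ pvE cs ws c) := by
  by_cases hc : 0 ≤ c
  · induction c, hc using Int.le_induction with
    | base =>
      rw [PySem.List.pyRange_one_eq_nil (le_refl 0)]
      refine ⟨fun w => by simp [PySem.Dict.get?_empty], by simp [pvW, PySem.List.pyRange_one_eq_nil (le_refl 0)], ?_⟩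
      simp only [List.foldl_nil]
      constructor
      · intro h; simp at h
      · rintro ⟨m, nn, hm, hmn, hnn, -⟩; omega
    | succ b hb ih =>
      obtain ⟨ihG, ihR1, ihR3⟩ := ih
      rw [PySem.List.pyRange_one_succ_right hb, List.foldl_append]
      simp only [List.foldl_cons, List.foldl_nil]
      set st := (PySem.List.pyRange 0 b 1).foldl
        (fun (st : PySem.Dict (List Char) Int × Bool × Bool) g =>
          if st.1.contains (pvWin cs ws g) then
            (st.1, true, if 2 ≤ g - st.1.getD (pvWin cs ws g) 0 then true else st.2.2)
          else
            (st.1.insert (pvWin cs ws g) g, st.2.1, st.2.2))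
        (PySem.Dict.empty, false, false) with hst
      by_cases hcont : st.1.contains (pvWin cs ws b) = true
      · -- window already seen
        obtain ⟨f, hf⟩ : ∃ f, st.1.get? (pvWin cs ws b) = some f := by
          rw [PySem.Dict.contains_eq_isSome_get?] at hcont
          exact Option.isSome_iff_exists.mp hcont
        have hfind : (PySem.List.pyRange 0 b 1).find? (fun g => pvWin cs ws g == pvWin cs ws b) = some f := by
          rw [← ihG]; exact hf
        have hpf : pvWin cs ws f = pvWin cs ws b := by
          have := List.find?_some hfind; simpa using this
        have hfmem : 0 ≤ f ∧ f < b := by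
          have := List.mem_of_find?_eq_some hfind
          exact PySem.List.mem_pyRange_one.mp this
        have hgetD : st.1.getD (pvWin cs ws b) 0 = f := by
          rw [PySem.Dict.getD_eq_get?_getD, hf]; rfl
        have hmemW : pvWin cs ws b ∈ pvW cs ws b := by
          simp only [pvW, List.mem_map]
          exact ⟨f, PySem.List.mem_pyRange_one.mpr ⟨hfmem.1, hfmem.2⟩, hpf⟩
        rw [if_pos hcont]
        refine ⟨?_, ?_, ?_⟩
        · intro w'
          show st.1.get? w' = _
          rw [List.find?_append]
          simp only [List.find?_cons, List.find?_nil]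
          by_cases hww : (pvWin cs ws b == w') = true
          · have hw' : w' = pvWin cs ws b := (eq_of_beq hww).symm
            subst hw'
            rw [ihG, hfind]
            simp
          · simp only [hww]
            rw [Option.or_none]
            exact ihG w'
        · show (true : Bool) = _
          rw [pvW_succ cs ws hb]
          have : ¬ (pvW cs ws b ++ [pvWin cs ws b]).Nodup := by
            rw [List.nodup_append]
            rintro ⟨-, -, h⟩
            exact h _ hmemW _ (by simp) rfl
          simp [this]
        · show (if 2 ≤ b - st.1.getD (pvWin cs ws b) 0 then true else st.2.2) = true ↔ _
          rw [hgetD]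
          by_cases hgap : 2 ≤ b - f
          · rw [if_pos hgap]
            have hE : pvE cs ws (b + 1) :=
              ⟨f, b, hfmem.1, by omega, by omega, hpf⟩
            exact iff_of_true rfl hE
          · rw [if_neg hgap]
            rw [ihR3]
            constructor
            · rintro ⟨m, nn, hm, hmn, hnn, he⟩
              exact ⟨m, nn, hm, hmn, by omega, he⟩
            · rintro ⟨m, nn, hm, hmn, hnn, he⟩
              by_cases h : nn < b
              · exact ⟨m, nn, hm, hmn, h, he⟩
              · have hnb : nn = b := by omega
                have he' : pvWin cs ws m = pvWin cs ws b := hnb ▸ he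
                have hfm : f ≤ m :=
                  pv_find?_pyRange_min (fun g => pvWin cs ws g == pvWin cs ws b)
                    (b - 0).toNat 0 b f m rfl hfind hm (by omega) (by simp [he'])
                omega
      · -- new window
        have hnone : st.1.get? (pvWin cs ws b) = none := by
          rw [PySem.Dict.contains_eq_isSome_get?] at hcont
          exact Option.not_isSome_iff_eq_none.mp (by simpa using hcont)
        have hfindnone : (PySem.List.pyRange 0 b 1).find? (fun g => pvWin cs ws g == pvWin cs ws b) = none := by
          rw [← ihG]; exact hnone
        have hnotmem : pvWin cs ws b ∉ pvW cs ws b := by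
          intro hmem
          simp only [pvW, List.mem_map] at hmem
          obtain ⟨g, hg, hgw⟩ := hmem
          have := List.find?_eq_none.mp hfindnone g hg
          simp [hgw] at this
        rw [if_neg hcont]
        refine ⟨?_, ?_, ?_⟩
        · intro w'
          show (st.1.insert (pvWin cs ws b) b).get? w' = _
          rw [List.find?_append]
          simp only [List.find?_cons, List.find?_nil]
          by_cases hww : w' = pvWin cs ws b
          · subst hww
            rw [PySem.Dict.get?_insert]
            rw [hfindnone]
            simp
          · rw [PySem.Dict.get?_insert]
            rw [if_neg hww]
            have : (pvWin cs ws b == w') = false := by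
              simp; intro h; exact hww h.symm
            simp only [this]
            rw [Option.or_none]
            exact ihG w'
        · show st.2.1 = _
          rw [pvW_succ cs ws hb, ihR1]
          have : (pvW cs ws b ++ [pvWin cs ws b]).Nodup ↔ (pvW cs ws b).Nodup := by
            rw [List.nodup_append]
            constructor
            · rintro ⟨h, -, -⟩; exact h
            · intro h
              refine ⟨h, by simp, ?_⟩
              intro a ha bb hbb; simp at hbb; subst hbb
              exact fun h' => hnotmem (h' ▸ ha)
          simp [this]
        · show st.2.2 = true ↔ _
          rw [ihR3]
          constructor
          · rintro ⟨m, nn, hm, hmn, hnn, he⟩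
            exact ⟨m, nn, hm, hmn, by omega, he⟩
          · rintro ⟨m, nn, hm, hmn, hnn, he⟩
            by_cases h : nn < b
            · exact ⟨m, nn, hm, hmn, h, he⟩
            · have hnb : nn = b := by omega
              have he' : pvWin cs ws m = pvWin cs ws b := hnb ▸ he
              refine absurd ?_ hnotmem
              rw [← he']
              simp only [pvW, List.mem_map]
              exact ⟨m, PySem.List.mem_pyRange_one.mpr ⟨hm, by omega⟩, rfl⟩
  · rw [PySem.List.pyRange_one_eq_nil (by omega)]
    refine ⟨fun w => by simp [PySem.Dict.get?_empty], by simp [pvW, PySem.List.pyRange_one_eq_nil (show c ≤ 0 by omega)], ?_⟩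
    simp only [List.foldl_nil]
    constructor
    · intro h; simp at h
    · rintro ⟨m, nn, hm, hmn, hnn, -⟩; omega

-- A's nested res3 loops decide pvE
theorem pv_res3A (cs : List Char) (ws c : Int) (hc : 0 ≤ c) :
    ((PySem.List.pyRange 0 ((c.toNat : Int) - 2) 1).foldl
      (fun res3 m =>
        (PySem.List.pyRange (m + 2) (c.toNat : Int) 1).foldl
          (fun res3 nn => if PySem.List.pyGetD (pvW cs ws c) m [] = PySem.List.pyGetD (pvW cs ws c) nn [] then true else res3)
          res3)
      false = true) ↔ pvE cs ws c := by
  have hcc : (c.toNat : Int) = c := Int.toNat_of_nonneg hc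
  rw [hcc]
  have hbody : (fun (res3 : Bool) m =>
      (PySem.List.pyRange (m + 2) c 1).foldl
        (fun res3 nn => if PySem.List.pyGetD (pvW cs ws c) m [] = PySem.List.pyGetD (pvW cs ws c) nn [] then true else res3)
        res3)
      = (fun (res3 : Bool) m => res3 || (PySem.List.pyRange (m + 2) c 1).any
          (fun nn => decide (PySem.List.pyGetD (pvW cs ws c) m [] = PySem.List.pyGetD (pvW cs ws c) nn []))) := by
    funext r m
    exact pv_foldl_ite_or _ _ r
  rw [hbody, pv_foldl_or]
  simp only [Bool.false_or, List.any_eq_true, PySem.List.mem_pyRange_one, decide_eq_true_eq]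
  constructor
  · rintro ⟨m, ⟨hm0, hm⟩, nn, ⟨hnn1, hnn2⟩, he⟩
    refine ⟨m, nn, hm0, hnn1, hnn2, ?_⟩
    rwa [pvW, PySem.List.pyGetD_map_pyRange_of_nonneg _ _ _ _ hm0 (by omega),
      PySem.List.pyGetD_map_pyRange_of_nonneg _ _ _ _ (by omega) hnn2] at he
  · rintro ⟨m, nn, hm0, hmn, hnn, he⟩
    refine ⟨m, ⟨hm0, by omega⟩, nn, ⟨hmn, hnn⟩, ?_⟩
    rw [pvW, PySem.List.pyGetD_map_pyRange_of_nonneg _ _ _ _ hm0 (by omega),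
      PySem.List.pyGetD_map_pyRange_of_nonneg _ _ _ _ (by omega) hnn]
    exact he

-- A's res2 loop equals B's direct character comparison
theorem pv_res2 (cs : List Char) (ws c : Int) (hc : c = (cs.length : Int) - ws + 1)
    (hpre : 2 ≤ ws ∨ (cs.length : Int) ≤ ws) :
    (PySem.List.pyRange 0 ((c.toNat : Int) - 1) 1).foldl
      (fun res2 m =>
        if PySem.List.pyGetD (PySem.List.pyGetD (pvW cs ws c) m []) 0 ' '
            = PySem.List.pyGetD (PySem.List.pyGetD (pvW cs ws c) (m + 1) []) 1 ' ' then true else res2)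
      false
    = (PySem.List.pyRange 0 (c - 1) 1).any
      (fun m => PySem.List.pyGetD cs m ' ' == PySem.List.pyGetD cs (m + 2) ' ') := by
  by_cases h1 : c ≤ 1
  · rw [PySem.List.pyRange_one_eq_nil (show (c.toNat : Int) - 1 ≤ 0 by omega),
      PySem.List.pyRange_one_eq_nil (show c - 1 ≤ 0 by omega)]
    simp
  · have hws : 2 ≤ ws := by
      rcases hpre with h | h
      · exact h
      · omega
    have hcc : (c.toNat : Int) - 1 = c - 1 := by omega
    rw [hcc, pv_foldl_ite_or]
    simp only [Bool.false_or]
    rw [← Bool.coe_iff_coe]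
    simp only [List.any_eq_true, PySem.List.mem_pyRange_one, decide_eq_true_eq, beq_iff_eq]
    have key : ∀ m : Int, 0 ≤ m → m < c - 1 →
        ((PySem.List.pyGetD (PySem.List.pyGetD (pvW cs ws c) m []) 0 ' '
          = PySem.List.pyGetD (PySem.List.pyGetD (pvW cs ws c) (m + 1) []) 1 ' ')
        ↔ (PySem.List.pyGetD cs m ' ' = PySem.List.pyGetD cs (m + 2) ' ')) := by
      intro m hm0 hm1
      have hmlen : m.toNat < cs.length := by omega
      have hm2len : m.toNat + 2 < cs.length := by omega
      rw [pvW, PySem.List.pyGetD_map_pyRange_of_nonneg _ _ _ _ hm0 (by omega),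
        PySem.List.pyGetD_map_pyRange_of_nonneg _ _ _ _ (by omega) (by omega)]
      have hwin : ∀ g : Int, 0 ≤ g → pvWin cs ws g = List.take ((g + ws).toNat - g.toNat) (List.drop g.toNat cs) := by
        intro g hg
        exact PySem.List.slice_toNat cs hg (by omega)
      -- left character: window m at 0 is cs[m]
      have hL : PySem.List.pyGetD (pvWin cs ws m) 0 ' ' = cs[m.toNat] := by
        rw [hwin m hm0, PySem.List.pyGetD_zero, List.getD_eq_getElem?_getD,
          List.getElem?_take, List.getElem?_drop]
        rw [if_pos (by omega)]
        rw [List.getElem?_eq_getElem (by omega)]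
        simp
      -- right character: window m+1 at 1 is cs[m+2]
      have hR : PySem.List.pyGetD (pvWin cs ws (m + 1)) 1 ' ' = cs[m.toNat + 2] := by
        have hlen2 : (1 : Int) < ((pvWin cs ws (m + 1)).length : Int) := by
          rw [hwin (m + 1) (by omega)]
          simp only [List.length_take, List.length_drop]
          omega
        rw [PySem.List.pyGetD_eq_getElem _ ' ' (by omega) hlen2]
        have hget? : (pvWin cs ws (m + 1))[(1 : Int).toNat]? = some cs[m.toNat + 2] := by
          rw [hwin (m + 1) (by omega)]
          show (List.take ((m + 1 + ws).toNat - (m + 1).toNat) (List.drop (m + 1).toNat cs))[1]? = _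
          rw [List.getElem?_take, List.getElem?_drop, if_pos (by omega)]
          have hidx : (m + 1).toNat + 1 = m.toNat + 2 := by omega
          rw [hidx, List.getElem?_eq_getElem (by omega)]
        have := List.getElem?_eq_getElem
          (show (1 : Int).toNat < (pvWin cs ws (m + 1)).length by omega)
        rw [this] at hget?
        exact Option.some.inj hget?
      rw [hL, hR,
        PySem.List.pyGetD_eq_getElem cs ' ' hm0 (by omega),
        PySem.List.pyGetD_eq_getElem cs ' ' (by omega) (by omega)]
      have : (m + 2).toNat = m.toNat + 2 := by omega
      simp only [this]
    constructor
    · rintro ⟨m, ⟨hm0, hm1⟩, he⟩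
      exact ⟨m, ⟨hm0, hm1⟩, (key m hm0 hm1).mp he⟩
    · rintro ⟨m, ⟨hm0, hm1⟩, he⟩
      exact ⟨m, ⟨hm0, hm1⟩, (key m hm0 hm1).mpr he⟩

-- canonical (let-free) forms of the two ports, definitionally equal to them
def pvA (cs : List Char) (ws : Int) : Bool × Bool × Bool :=
  ((((PySem.List.pyRange 0 ((cs.length : Int) - ws + 1) 1).foldl
      (fun (st : List (List Char) × Bool) g =>
        (st.1 ++ [pvWin cs ws g],
          if (((st.1 ++ [pvWin cs ws g]).length : Int) ≠
              PySem.Set.len (PySem.Set.ofList (st.1 ++ [pvWin cs ws g]))) then true else st.2))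
      ([], false)).2),
   ((PySem.List.pyRange 0 ((((PySem.List.pyRange 0 ((cs.length : Int) - ws + 1) 1).foldl
      (fun (st : List (List Char) × Bool) g =>
        (st.1 ++ [pvWin cs ws g],
          if (((st.1 ++ [pvWin cs ws g]).length : Int) ≠
              PySem.Set.len (PySem.Set.ofList (st.1 ++ [pvWin cs ws g]))) then true else st.2))
      ([], false)).1.length : Int) - 1) 1).foldl
      (fun res2 m =>
        if PySem.List.pyGetD (PySem.List.pyGetD ((PySem.List.pyRange 0 ((cs.length : Int) - ws + 1) 1).foldl
      (fun (st : List (List Char) × Bool) g =>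
        (st.1 ++ [pvWin cs ws g],
          if (((st.1 ++ [pvWin cs ws g]).length : Int) ≠
              PySem.Set.len (PySem.Set.ofList (st.1 ++ [pvWin cs ws g]))) then true else st.2))
      ([], false)).1 m []) 0 ' '
            = PySem.List.pyGetD (PySem.List.pyGetD ((PySem.List.pyRange 0 ((cs.length : Int) - ws + 1) 1).foldl
      (fun (st : List (List Char) × Bool) g =>
        (st.1 ++ [pvWin cs ws g],
          if (((st.1 ++ [pvWin cs ws g]).length : Int) ≠
              PySem.Set.len (PySem.Set.ofList (st.1 ++ [pvWin cs ws g]))) then true else st.2))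
      ([], false)).1 (m + 1) []) 1 ' ' then true else res2)
      false),
   ((PySem.List.pyRange 0 ((((PySem.List.pyRange 0 ((cs.length : Int) - ws + 1) 1).foldl
      (fun (st : List (List Char) × Bool) g =>
        (st.1 ++ [pvWin cs ws g],
          if (((st.1 ++ [pvWin cs ws g]).length : Int) ≠
              PySem.Set.len (PySem.Set.ofList (st.1 ++ [pvWin cs ws g]))) then true else st.2))
      ([], false)).1.length : Int) - 2) 1).foldl
      (fun res3 m =>
        (PySem.List.pyRange (m + 2) (((PySem.List.pyRange 0 ((cs.length : Int) - ws + 1) 1).foldl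
      (fun (st : List (List Char) × Bool) g =>
        (st.1 ++ [pvWin cs ws g],
          if (((st.1 ++ [pvWin cs ws g]).length : Int) ≠
              PySem.Set.len (PySem.Set.ofList (st.1 ++ [pvWin cs ws g]))) then true else st.2))
      ([], false)).1.length : Int) 1).foldl
          (fun res3 nn => if PySem.List.pyGetD ((PySem.List.pyRange 0 ((cs.length : Int) - ws + 1) 1).foldl
      (fun (st : List (List Char) × Bool) g =>
        (st.1 ++ [pvWin cs ws g],
          if (((st.1 ++ [pvWin cs ws g]).length : Int) ≠
              PySem.Set.len (PySem.Set.ofList (st.1 ++ [pvWin cs ws g]))) then true else st.2))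
      ([], false)).1 m [] = PySem.List.pyGetD ((PySem.List.pyRange 0 ((cs.length : Int) - ws + 1) 1).foldl
      (fun (st : List (List Char) × Bool) g =>
        (st.1 ++ [pvWin cs ws g],
          if (((st.1 ++ [pvWin cs ws g]).length : Int) ≠
              PySem.Set.len (PySem.Set.ofList (st.1 ++ [pvWin cs ws g]))) then true else st.2))
      ([], false)).1 nn [] then true else res3)
          res3)
      false))

def pvB (cs : List Char) (ws : Int) : Bool × Bool × Bool :=
  (((PySem.List.pyRange 0 ((cs.length : Int) - ws + 1) 1).foldl
      (fun (st : PySem.Dict (List Char) Int × Bool × Bool) g =>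
        if st.1.contains (pvWin cs ws g) then
          (st.1, true, if 2 ≤ g - st.1.getD (pvWin cs ws g) 0 then true else st.2.2)
        else
          (st.1.insert (pvWin cs ws g) g, st.2.1, st.2.2))
      (PySem.Dict.empty, false, false)).2.1,
   (PySem.List.pyRange 0 (((cs.length : Int) - ws + 1) - 1) 1).any
      (fun m => PySem.List.pyGetD cs m ' ' == PySem.List.pyGetD cs (m + 2) ' '),
   ((PySem.List.pyRange 0 ((cs.length : Int) - ws + 1) 1).foldl
      (fun (st : PySem.Dict (List Char) Int × Bool × Bool) g =>
        if st.1.contains (pvWin cs ws g) then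
          (st.1, true, if 2 ≤ g - st.1.getD (pvWin cs ws g) 0 then true else st.2.2)
        else
          (st.1.insert (pvWin cs ws g) g, st.2.1, st.2.2))
      (PySem.Dict.empty, false, false)).2.2)

theorem pv_main' (cs : List Char) (ws : Int)
    (hpre : 2 ≤ ws ∨ (cs.length : Int) ≤ ws) :
    pvA cs ws = pvB cs ws := by
  unfold pvA pvB
  set c : Int := (cs.length : Int) - ws + 1 with hc
  rw [pv_A1 cs ws c]
  obtain ⟨-, hB1, hB3⟩ := pv_B1 cs ws c
  show (_, _, _) = (_, _, _)
  rw [hB1]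
  refine congrArg₂ Prod.mk rfl (congrArg₂ Prod.mk ?_ ?_)
  · show (PySem.List.pyRange 0 (((pvW cs ws c).length : Int) - 1) 1).foldl _ false = _
    rw [pvW_length]
    exact pv_res2 cs ws c hc hpre
  · by_cases hc0 : 0 ≤ c
    · show (PySem.List.pyRange 0 (((pvW cs ws c).length : Int) - 2) 1).foldl _ false = _
      rw [pvW_length]
      have h3 := pv_res3A cs ws c hc0
      rw [← Bool.coe_iff_coe, h3, hB3]
    · rw [PySem.List.pyRange_one_eq_nil (show c ≤ 0 by omega)]
      show (PySem.List.pyRange 0 (((pvW cs ws c).length : Int) - 2) 1).foldl _ false = _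
      rw [pvW_length]
      rw [PySem.List.pyRange_one_eq_nil (show ((c.toNat : Int) - 2) ≤ 0 by omega)]
      rfl

theorem pv_main (string : String) (window_size : Int)
    (hpre : Pre_pairs_counter string window_size) :
    pairs_counter string window_size = pairs_counter_alt string window_size :=
  pv_main' string.toList window_size hpre

-- ===== VERDICT (by name: the statement is the Claim_ definition above) =====
theorem pairs_counter_spec : Claim_equal_pairs_counter := by
  intro string window_size _ hpre
  unfold Spec_pairs_counter
  exact pv_main string window_size hpre
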